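-- pv_equiv track=rewrite | github.com/PatWalters/casp | submission_processing/process_submission_files.py | fix_molfile
-- ===== SOURCE A (Python) =====
-- def fix_molfile(mf_in):
--     """ Fix broken V3000 molfiles
--     :param mf_in: input molfile as a text string
--     :return: fixed V3000 molfile as a text string
--     """
--     hdr = ['', '  Mrv2004 09022213143D          ', '', '  0  0  0     0  0            999 V3000']
--     lines = mf_in.split("\n")
--     start = 0
--     for idx, line in enumerate(lines):
--         if line.find("M  V30 BEGIN CTAB") >= 0:
--             start = idx
--             break
--     return "\n".join(hdr + lines[start:])
-- ===== SOURCE B (Python) =====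
-- def fix_molfile(mf_in):
--     """ Fix broken V3000 molfiles
--     :param mf_in: input molfile as a text string
--     :return: fixed V3000 molfile as a text string
--     """
--     hdr = '\n  Mrv2004 09022213143D          \n\n  0  0  0     0  0            999 V3000\n'
--     pos = mf_in.find("M  V30 BEGIN CTAB")
--     if pos < 0:
--         line_start = 0
--     else:
--         line_start = mf_in.rfind("\n", 0, pos) + 1
--     return hdr + mf_in[line_start:]
-- ===== Notes on version B (the rewrite author's own statement) =====
-- stated objective: simpler
-- what changed: B drops the split-into-lines + enumerate loop + join: it locates the marker in the raw string with find, backs up to the start of the marker's line with a bounded rfind of the newline, and returns a constant header string plus the tail slice.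
import Mathlib
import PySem

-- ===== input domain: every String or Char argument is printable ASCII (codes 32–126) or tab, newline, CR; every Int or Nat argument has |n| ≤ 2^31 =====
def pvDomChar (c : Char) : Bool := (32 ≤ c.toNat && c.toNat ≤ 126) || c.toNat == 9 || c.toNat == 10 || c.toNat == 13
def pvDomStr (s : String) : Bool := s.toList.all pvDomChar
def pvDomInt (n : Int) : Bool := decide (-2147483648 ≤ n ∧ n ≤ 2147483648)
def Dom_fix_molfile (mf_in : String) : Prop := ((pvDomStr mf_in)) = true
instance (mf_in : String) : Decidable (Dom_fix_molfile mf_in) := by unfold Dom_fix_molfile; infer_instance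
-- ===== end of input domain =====

-- B replaces A's split/enumerate/join line machinery by raw-string find + rfind + slice (objective: simpler).

-- ===== PORT A =====
-- A's for-with-break over enumerate(lines): the index of the first line containing the marker, else the initial start = 0
def fixFindStart : List (List Char) → Nat → Nat
  | [], _ => 0
  | line :: rest, idx =>
    if 0 ≤ PySem.Chars.find line "M  V30 BEGIN CTAB".toList then idx
    else fixFindStart rest (idx + 1)

def fix_molfile (mf_in : String) : String :=
  let hdr : List (List Char) :=
    [[], "  Mrv2004 09022213143D          ".toList, [], "  0  0  0     0  0            999 V3000".toList]
  let lines : List (List Char) := PySem.Chars.splitOn mf_in.toList ['\n']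
  let start : Nat := fixFindStart lines 0
  String.mk (PySem.Chars.join ['\n'] (hdr ++ lines.drop start))

-- ===== PORT B =====
def fix_molfile_alt (mf_in : String) : String :=
  let hdr : String := "\n  Mrv2004 09022213143D          \n\n  0  0  0     0  0            999 V3000\n"
  let pos : Int := PySem.Str.find mf_in "M  V30 BEGIN CTAB"
  let lineStart : Int := if pos < 0 then 0 else PySem.Str.rfindFrom mf_in "\n" 0 (some pos) + 1
  String.mk (hdr.toList ++ PySem.Chars.slice mf_in.toList (some lineStart) none)

-- ===== PRECONDITION & SPEC =====
def Spec_fix_molfile (mf_in : String) (out : String) : Prop := out = fix_molfile_alt mf_in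
instance (mf_in : String) (out : String) : Decidable (Spec_fix_molfile mf_in out) := by unfold Spec_fix_molfile; infer_instance

-- ===== CLAIM (what is proved, stated in full; the proofs are below) =====
def Claim_equal_fix_molfile : Prop := ∀ (mf_in : String), Dom_fix_molfile mf_in → Spec_fix_molfile mf_in (fix_molfile mf_in)

-- ===== LEMMAS AND PROOFS =====

def pvM : List Char := "M  V30 BEGIN CTAB".toList

theorem pvM_no_newline : '\n' ∉ pvM := by decide

-- unfolding equations for PySem.Chars.splitOn.go / rfind.go
theorem sgo_succ_nil (sep cur : List Char) (fuel : Nat) (acc : List (List Char)) :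
    PySem.Chars.splitOn.go sep (fuel+1) [] cur acc = (cur.reverse :: acc).reverse := rfl

theorem sgo_succ_cons (sep cur : List Char) (fuel : Nat) (c : Char) (rest : List Char)
    (acc : List (List Char)) :
    PySem.Chars.splitOn.go sep (fuel+1) (c :: rest) cur acc =
      if sep.isPrefixOf (c :: rest) then
        PySem.Chars.splitOn.go sep fuel (List.drop sep.length (c :: rest)) [] (cur.reverse :: acc)
      else PySem.Chars.splitOn.go sep fuel rest (c :: cur) acc := rfl

theorem rgo_zero (s sub : List Char) :
    PySem.Chars.rfind.go s sub 0 = if sub.isPrefixOf s then 0 else -1 := rfl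

theorem rgo_succ (s sub : List Char) (j : Nat) :
    PySem.Chars.rfind.go s sub (j+1) =
      if sub.isPrefixOf (s.drop (j+1)) then ((j:Int)+1) else PySem.Chars.rfind.go s sub j := rfl

-- splitOn.go invariant, bridging PySem.Chars.splitOn to Mathlib's List.splitOn
theorem splitgo_inv : ∀ (fuel : Nat) (l cur : List Char) (accs : List (List Char)),
    l.length < fuel →
    PySem.Chars.splitOn.go ['\n'] fuel l cur accs =
      accs.reverse ++ (List.splitOnP (· == '\n') l).modifyHead (cur.reverse ++ ·) := by
  intro fuel
  induction fuel with
  | zero => intro l cur accs h; omega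
  | succ fuel ih =>
    intro l cur accs h
    cases l with
    | nil => simp [sgo_succ_nil, List.splitOnP_nil]
    | cons c rest =>
      rw [sgo_succ_cons]
      have hpre : (['\n'] : List Char).isPrefixOf (c :: rest) = ('\n' == c) := by
        simp [List.isPrefixOf]
      by_cases hc : c = '\n'
      · subst hc
        rw [hpre]
        simp only [beq_self_eq_true, if_true, List.length_cons] at *
        rw [show List.drop (([] : List Char).length + 1) ('\n' :: rest) = rest from rfl]
        rw [ih rest [] _ (by simp at h ⊢; omega)]
        rw [List.splitOnP_cons]
        simp only [beq_self_eq_true, if_true]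
        cases List.splitOnP (fun x => x == '\n') rest with
        | nil => simp
        | cons a as => simp
      · rw [hpre]
        have : ('\n' == c) = false := by simpa using fun h' => hc h'.symm
        rw [this]
        rw [if_neg (by simp)]
        rw [ih rest (c :: cur) accs (by simp at h ⊢; omega)]
        rw [List.splitOnP_cons]
        rw [if_neg (by simpa using hc)]
        rw [List.modifyHead_modifyHead]
        have hfun : ((fun x => cur.reverse ++ x) ∘ (List.cons c)) = (fun x => (c :: cur).reverse ++ x) := by
          funext x; simp
        rw [hfun]

theorem chars_splitOn_eq (cs : List Char) :
    PySem.Chars.splitOn cs ['\n'] = cs.splitOn '\n' := by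
  unfold PySem.Chars.splitOn
  rw [splitgo_inv (cs.length + 1) cs [] [] (by omega)]
  have : (cs.splitOnP (· == '\n')).modifyHead (([] : List Char).reverse ++ ·) = cs.splitOnP (· == '\n') := by
    cases hx : cs.splitOnP (· == '\n') with
    | nil => rfl
    | cons a as => simp
  rw [this]
  rfl

-- every string is (no-newline) or (first line ++ '\n' ++ rest)
theorem nl_decomp (cs : List Char) :
    '\n' ∉ cs ∨ ∃ l t, cs = l ++ '\n' :: t ∧ '\n' ∉ l := by
  induction cs with
  | nil => exact Or.inl (by simp)
  | cons c cs ih =>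
    by_cases hc : c = '\n'
    · exact Or.inr ⟨[], cs, by simp [hc], by simp⟩
    · rcases ih with h | ⟨l, t, rfl, hl⟩
      · refine Or.inl ?_
        simp only [List.mem_cons]
        rintro (h' | h')
        · exact hc h'.symm
        · exact h h'
      · refine Or.inr ⟨c :: l, t, rfl, ?_⟩
        simp only [List.mem_cons]
        rintro (h' | h')
        · exact hc h'.symm
        · exact hl h'

theorem splitOn_no_newline {cs : List Char} (h : '\n' ∉ cs) : cs.splitOn '\n' = [cs] := by
  unfold List.splitOn
  exact List.splitOnP_eq_single _ _ (by intro x hx hbeq; exact h (by simpa using (beq_iff_eq.mp hbeq) ▸ hx))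

theorem splitOn_first {l : List Char} (t : List Char) (h : '\n' ∉ l) :
    (l ++ '\n' :: t).splitOn '\n' = l :: t.splitOn '\n' := by
  unfold List.splitOn
  exact List.splitOnP_first _ _ (by intro x hx hbeq; exact h ((beq_iff_eq.mp hbeq) ▸ hx)) _ (by simp) _

-- find is the unique minimal occurrence position
theorem find_eq_of {s sub : List Char} (j : Nat) (hpre : sub <+: s.drop j)
    (hmin : ∀ i < j, ¬ sub <+: s.drop i) : PySem.Chars.find s sub = (j : Int) := by
  have hin : PySem.Chars.isIn sub s = true :=
    (PySem.Chars.exists_prefix_drop_iff_isIn sub s).mp ⟨j, hpre⟩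
  have hfix : sub <:+: s := (PySem.Chars.isIn_iff_infix sub s).mp hin
  have hnn : 0 ≤ PySem.Chars.find s sub := (PySem.Chars.find_nonneg_iff s sub).mpr hfix
  obtain ⟨hp, hm⟩ := PySem.Chars.find_spec hnn
  have : (PySem.Chars.find s sub).toNat = j := by
    rcases Nat.lt_trichotomy (PySem.Chars.find s sub).toNat j with h | h | h
    · exact absurd hp (hmin _ h)
    · exact h
    · exact absurd hpre (hm _ h)
  omega

-- a newline-free marker cannot start inside (or at the newline after) a marker-free first line
theorem no_occ_le {m l t : List Char} (hnl : '\n' ∉ m) (hno : ¬ m <:+: l)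
    {i : Nat} (hi : i ≤ l.length) : ¬ m <+: (l ++ '\n' :: t).drop i := by
  intro hp
  have hdrop : (l ++ '\n' :: t).drop i = l.drop i ++ '\n' :: t := by
    rw [List.drop_append]
    have : i - l.length = 0 := by omega
    simp [this]
  rw [hdrop] at hp
  by_cases hlen : m.length ≤ (l.drop i).length
  · have : m = (l.drop i ++ '\n' :: t).take m.length := List.prefix_iff_eq_take.mp hp
    rw [List.take_append] at this
    have h0 : m.length - (l.drop i).length = 0 := by omega
    rw [h0] at this
    simp only [List.take_zero, List.append_nil] at this
    have : m <+: l.drop i := this ▸ List.take_prefix _ _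
    exact hno (this.isInfix.trans (List.drop_suffix i l).isInfix)
  · have : m = (l.drop i ++ '\n' :: t).take m.length := List.prefix_iff_eq_take.mp hp
    rw [List.take_append] at this
    have hpos : 0 < m.length - (l.drop i).length := by omega
    obtain ⟨k, hk⟩ : ∃ k, m.length - (l.drop i).length = k + 1 := ⟨_, (Nat.succ_pred_eq_of_pos hpos).symm⟩
    rw [hk, List.take_of_length_le (by omega : (l.drop i).length ≤ m.length),
      List.take_succ_cons] at this
    exact hnl (this ▸ (by simp : '\n' ∈ l.drop i ++ '\n' :: List.take k t))

-- the marker occurs in the tail when it occurs but not in the first line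
theorem infix_tail {m l t : List Char} (hnl : '\n' ∉ m) (hno : ¬ m <:+: l)
    (h : m <:+: l ++ '\n' :: t) : m <:+: t := by
  have hin := (PySem.Chars.isIn_iff_infix m _).mpr h
  obtain ⟨j, hj⟩ := (PySem.Chars.exists_prefix_drop_iff_isIn m _).mpr hin
  by_cases hjl : j ≤ l.length
  · exact absurd hj (no_occ_le hnl hno hjl)
  · have : (l ++ '\n' :: t).drop j = t.drop (j - l.length - 1) := by
      have h1 : l.length ≤ j := by omega
      have h2 : j - l.length = (j - l.length - 1) + 1 := by omega
      rw [List.drop_append, List.drop_of_length_le h1, h2, List.drop_succ_cons]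
      simp
    rw [this] at hj
    exact (hj.isInfix).trans (List.drop_suffix _ t).isInfix

theorem find_append_newline {m l t : List Char} (hnl : '\n' ∉ m) (hno : ¬ m <:+: l) :
    PySem.Chars.find (l ++ '\n' :: t) m =
      if PySem.Chars.find t m = -1 then -1 else (l.length : Int) + 1 + PySem.Chars.find t m := by
  have hdropm : ∀ j : Nat, (l ++ '\n' :: t).drop (l.length + 1 + j) = t.drop j := by
    intro j
    rw [List.drop_append, List.drop_of_length_le (by omega)]
    have : l.length + 1 + j - l.length = j + 1 := by omega
    simp [this]
  by_cases hneg : PySem.Chars.find t m = -1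
  · rw [if_pos hneg]
    rw [PySem.Chars.find_eq_neg_one_iff] at hneg ⊢
    intro hcs
    obtain ⟨j, hj⟩ := (PySem.Chars.exists_prefix_drop_iff_isIn m _).mpr
      ((PySem.Chars.isIn_iff_infix m _).mpr hcs)
    by_cases hjl : j ≤ l.length
    · exact no_occ_le hnl hno hjl hj
    · have hj' : j = l.length + 1 + (j - l.length - 1) := by omega
      rw [hj', hdropm] at hj
      exact hneg (hj.isInfix.trans (List.drop_suffix _ t).isInfix)
  · rw [if_neg hneg]
    have hpos : 0 ≤ PySem.Chars.find t m := by
      have := PySem.Chars.neg_one_le_find t m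
      omega
    obtain ⟨hp, hmn⟩ := PySem.Chars.find_spec hpos
    have := find_eq_of (s := l ++ '\n' :: t) (sub := m) (l.length + 1 + (PySem.Chars.find t m).toNat)
      (by rw [hdropm]; exact hp)
      (by
        intro i hi hpre
        by_cases hil : i ≤ l.length
        · exact no_occ_le hnl hno hil hpre
        · have hi' : i = l.length + 1 + (i - l.length - 1) := by omega
          rw [hi', hdropm] at hpre
          exact hmn _ (by omega) hpre)
    rw [this]
    push_cast [Int.toNat_of_nonneg hpos]
    ring

-- every piece of splitOn is an infix of the original
theorem line_infix : ∀ (n : Nat) (cs line : List Char), cs.length = n →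
    line ∈ cs.splitOn '\n' → line <:+: cs := by
  intro n
  induction n using Nat.strong_induction_on with
  | _ n ih =>
    intro cs line hlen hmem
    rcases nl_decomp cs with h | ⟨l, t, rfl, hl⟩
    · rw [splitOn_no_newline h] at hmem
      simp at hmem
      exact hmem ▸ List.infix_rfl
    · rw [splitOn_first t hl] at hmem
      rcases List.mem_cons.mp hmem with rfl | hmem'
      · exact (List.prefix_append line ('\n' :: t)).isInfix
      · have ht : t.length < n := by simp at hlen; omega
        have := ih t.length ht t line rfl hmem'
        exact this.trans ((List.suffix_cons '\n' t).trans (List.suffix_append (l) _)).isInfix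

-- if the marker occurs, some line of splitOn contains it
theorem exists_line : ∀ (n : Nat) (cs : List Char), cs.length = n → pvM <:+: cs →
    ∃ line ∈ cs.splitOn '\n', pvM <:+: line := by
  intro n
  induction n using Nat.strong_induction_on with
  | _ n ih =>
    intro cs hlen hinf
    rcases nl_decomp cs with h | ⟨l, t, rfl, hl⟩
    · exact ⟨cs, by rw [splitOn_no_newline h]; simp, hinf⟩
    · rw [splitOn_first t hl]
      by_cases hil : pvM <:+: l
      · exact ⟨l, by simp, hil⟩
      · have ht : t.length < n := by simp at hlen; omega
        obtain ⟨line, h1, h2⟩ := ih t.length ht t rfl (infix_tail pvM_no_newline hil hinf)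
        exact ⟨line, by simp [h1], h2⟩

theorem fixFindStart_shift (ls : List (List Char)) (h : ∃ u ∈ ls, 0 ≤ PySem.Chars.find u pvM) :
    ∀ idx, fixFindStart ls (idx + 1) = fixFindStart ls idx + 1 := by
  induction ls with
  | nil => simp at h
  | cons a as ih =>
    intro idx
    simp only [fixFindStart]
    rw [show ("M  V30 BEGIN CTAB".toList) = pvM from rfl]
    by_cases ha : 0 ≤ PySem.Chars.find a pvM
    · rw [if_pos ha, if_pos ha]
    · have h' : ∃ u ∈ as, 0 ≤ PySem.Chars.find u pvM := by
        rcases h with ⟨u, hu, hfu⟩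
        rcases List.mem_cons.mp hu with rfl | hu'
        · exact absurd hfu ha
        · exact ⟨u, hu', hfu⟩
      rw [if_neg ha, if_neg ha]
      exact ih h' (idx + 1)

theorem fixFindStart_none (ls : List (List Char)) (h : ∀ u ∈ ls, ¬ 0 ≤ PySem.Chars.find u pvM) :
    ∀ idx, fixFindStart ls idx = 0 := by
  induction ls with
  | nil => intro idx; rfl
  | cons a as ih =>
    intro idx
    simp only [fixFindStart]
    rw [show ("M  V30 BEGIN CTAB".toList) = pvM from rfl]
    rw [if_neg (h a (by simp))]
    exact ih (fun u hu => h u (List.mem_cons_of_mem a hu)) (idx + 1)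

-- rfind facts
theorem rgo_ge (s sub : List Char) : ∀ j, -1 ≤ PySem.Chars.rfind.go s sub j := by
  intro j
  induction j with
  | zero => rw [rgo_zero]; split <;> omega
  | succ j ih => rw [rgo_succ]; split <;> omega

theorem rfind_ge (s sub : List Char) : -1 ≤ PySem.Chars.rfind s sub := by
  unfold PySem.Chars.rfind
  exact rgo_ge s sub s.length

theorem rfind_no_newline {s : List Char} (h : '\n' ∉ s) : PySem.Chars.rfind s ['\n'] = -1 := by
  have hnp : ∀ i, ¬ (['\n'] : List Char).isPrefixOf (s.drop i) = true := by
    intro i hp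
    have := List.isPrefixOf_iff_prefix.mp hp
    exact h (List.drop_subset i s (this.subset (by simp)))
  unfold PySem.Chars.rfind
  generalize s.length = j
  induction j with
  | zero => rw [rgo_zero, if_neg (by simpa using hnp 0)]
  | succ j ih => rw [rgo_succ, if_neg (hnp (j+1)), ih]

theorem rgo_shift (l t : List Char) : ∀ j, j ≤ t.length →
    PySem.Chars.rfind.go (l ++ '\n' :: t) ['\n'] (l.length + 1 + j) =
      (l.length : Int) + 1 + PySem.Chars.rfind.go t ['\n'] j := by
  have hdropm : ∀ j : Nat, (l ++ '\n' :: t).drop (l.length + 1 + j) = t.drop j := by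
    intro j
    rw [List.drop_append, List.drop_of_length_le (by omega)]
    have : l.length + 1 + j - l.length = j + 1 := by omega
    simp [this]
  have hmid : PySem.Chars.rfind.go (l ++ '\n' :: t) ['\n'] l.length = l.length := by
    cases hl : l.length with
    | zero =>
      have hnil : l = [] := List.length_eq_zero_iff.mp hl
      subst hnil
      rw [rgo_zero, if_pos (by simp [List.isPrefixOf])]
      simp
    | succ k =>
      rw [rgo_succ]
      rw [if_pos ?_]
      · simp
      · have : (l ++ '\n' :: t).drop (k+1) = '\n' :: t := by
          rw [← hl]
          rw [List.drop_append, List.drop_of_length_le (by omega)]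
          simp
        rw [this]
        simp [List.isPrefixOf]
  intro j
  induction j with
  | zero =>
    intro _
    rw [show l.length + 1 + 0 = l.length + 1 from rfl, rgo_succ, hdropm 0, List.drop_zero, rgo_zero]
    by_cases hp : (['\n'] : List Char).isPrefixOf t = true
    · rw [if_pos hp, if_pos hp]; ring
    · rw [if_neg hp, if_neg hp, hmid]; ring
  | succ j ih =>
    intro hj
    rw [show l.length + 1 + (j+1) = (l.length + 1 + j) + 1 from rfl,
      rgo_succ, show l.length + 1 + j + 1 = l.length + 1 + (j+1) by omega, hdropm (j+1), rgo_succ]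
    by_cases hp : (['\n'] : List Char).isPrefixOf (t.drop (j+1)) = true
    · rw [if_pos hp, if_pos hp]; push_cast; ring
    · rw [if_neg hp, if_neg hp, ih (by omega)]

theorem rfind_append (l t : List Char) :
    PySem.Chars.rfind (l ++ '\n' :: t) ['\n'] = (l.length : Int) + 1 + PySem.Chars.rfind t ['\n'] := by
  unfold PySem.Chars.rfind
  have hlen : (l ++ '\n' :: t).length = l.length + 1 + t.length := by simp; omega
  rw [hlen]
  exact rgo_shift l t t.length le_rfl

-- B's rfind(mf_in, "\n", 0, pos) + 1 is rfind over the prefix before pos, plus one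
theorem alt_lineStart (cs : List Char) (p : Int) (h0 : 0 ≤ p) (hl : p ≤ cs.length) :
    PySem.Chars.rfindFrom cs ['\n'] 0 (some p) + 1 =
      PySem.Chars.rfind (cs.take p.toNat) ['\n'] + 1 := by
  unfold PySem.Chars.rfindFrom
  simp only [if_neg (by omega : ¬ (cs.length : Int) < p), if_neg (by omega : ¬ p < 0),
    if_neg (by omega : ¬ (0:Int) < 0)]
  rw [show Int.toNat 0 = 0 from rfl, List.drop_zero]
  split
  · rename_i hr
    rw [hr]
  · ring

theorem join_hdr (ls : List (List Char)) (h : ls ≠ []) :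
    PySem.Chars.join ['\n'] ([[], "  Mrv2004 09022213143D          ".toList, [],
        "  0  0  0     0  0            999 V3000".toList] ++ ls) =
      "\n  Mrv2004 09022213143D          \n\n  0  0  0     0  0            999 V3000\n".toList ++
        PySem.Chars.join ['\n'] ls := by
  obtain ⟨a, ls', rfl⟩ := List.exists_cons_of_ne_nil h
  simp only [List.cons_append, List.nil_append]
  rw [PySem.Chars.join_cons_cons, PySem.Chars.join_cons_cons, PySem.Chars.join_cons_cons,
    PySem.Chars.join_cons_cons]
  simp

-- the heart of the equivalence: when the marker occurs, A's joined tail of lines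
-- is exactly B's character-level tail slice
theorem main_eq : ∀ (n : Nat) (cs : List Char), cs.length = n → pvM <:+: cs →
    (cs.splitOn '\n').drop (fixFindStart (cs.splitOn '\n') 0) ≠ [] ∧
      PySem.Chars.join ['\n'] ((cs.splitOn '\n').drop (fixFindStart (cs.splitOn '\n') 0)) =
        cs.drop (PySem.Chars.rfind (cs.take (PySem.Chars.find cs pvM).toNat) ['\n'] + 1).toNat := by
  intro n
  induction n using Nat.strong_induction_on with
  | _ n ih =>
    intro cs hlen hinf
    rcases nl_decomp cs with h | ⟨l, t, rfl, hl⟩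
    · -- no newline at all: everything is kept on both sides
      have hfz : fixFindStart (cs.splitOn '\n') 0 = 0 := by
        rw [splitOn_no_newline h]
        simp only [fixFindStart]
        rw [show ("M  V30 BEGIN CTAB".toList) = pvM from rfl,
          if_pos ((PySem.Chars.find_nonneg_iff cs pvM).mpr hinf)]
      rw [hfz, List.drop_zero, splitOn_no_newline h]
      refine ⟨by simp, ?_⟩
      rw [PySem.Chars.join_singleton]
      rw [rfind_no_newline (fun hmem => h (List.take_subset _ cs hmem))]
      simp
    · by_cases hml : pvM <:+: l
      · -- marker in the first line: both sides keep everything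
        have hfz : fixFindStart ((l ++ '\n' :: t).splitOn '\n') 0 = 0 := by
          rw [splitOn_first t hl]
          simp only [fixFindStart]
          rw [show ("M  V30 BEGIN CTAB".toList) = pvM from rfl,
            if_pos ((PySem.Chars.find_nonneg_iff l pvM).mpr hml)]
        rw [hfz, List.drop_zero]
        refine ⟨by rw [splitOn_first t hl]; simp, ?_⟩
        have hjoin : PySem.Chars.join ['\n'] ((l ++ '\n' :: t).splitOn '\n') = l ++ '\n' :: t :=
          List.intercalate_splitOn _ '\n'
        rw [hjoin]
        -- the first occurrence of the marker lies inside l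
        have hml' := hml
        obtain ⟨u, v, huv⟩ := hml'
        have hpre : pvM <+: (l ++ '\n' :: t).drop u.length := by
          have : (l ++ '\n' :: t).drop u.length = pvM ++ (v ++ '\n' :: t) := by
            rw [← huv]
            rw [List.append_assoc, List.append_assoc, List.drop_append,
              List.drop_of_length_le le_rfl]
            simp
          rw [this]
          exact List.prefix_append _ _
        have hnn : 0 ≤ PySem.Chars.find (l ++ '\n' :: t) pvM :=
          (PySem.Chars.find_nonneg_iff _ pvM).mpr
            (List.IsInfix.trans hml (List.prefix_append l ('\n' :: t)).isInfix)
        have hle : (PySem.Chars.find (l ++ '\n' :: t) pvM).toNat ≤ u.length := by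
          by_contra hgt
          exact (PySem.Chars.find_spec hnn).2 u.length (by omega) hpre
        have hul : u.length ≤ l.length := by
          rw [← huv]; simp
        have htake : (l ++ '\n' :: t).take (PySem.Chars.find (l ++ '\n' :: t) pvM).toNat =
            l.take (PySem.Chars.find (l ++ '\n' :: t) pvM).toNat := by
          rw [List.take_append]
          have : (PySem.Chars.find (l ++ '\n' :: t) pvM).toNat - l.length = 0 := by omega
          simp [this]
        rw [htake, rfind_no_newline (fun hmem => hl (List.take_subset _ l hmem))]
        simp
      · -- marker beyond the first line: both sides advance past the first line and recurse
        have hmt : pvM <:+: t := infix_tail pvM_no_newline hml hinf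
        have hfl : PySem.Chars.find l pvM = -1 := (PySem.Chars.find_eq_neg_one_iff l pvM).mpr hml
        have hshift : fixFindStart ((l ++ '\n' :: t).splitOn '\n') 0 =
            fixFindStart (t.splitOn '\n') 0 + 1 := by
          rw [splitOn_first t hl]
          simp only [fixFindStart]
          rw [show ("M  V30 BEGIN CTAB".toList) = pvM from rfl, hfl,
            if_neg (by omega : ¬ (0:Int) ≤ -1)]
          obtain ⟨line, hmem, hlinf⟩ := exists_line t.length t rfl hmt
          exact fixFindStart_shift (t.splitOn '\n')
            ⟨line, hmem, (PySem.Chars.find_nonneg_iff line pvM).mpr hlinf⟩ 0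
        have ht := ih t.length (by simp at hlen; omega) t rfl hmt
        rw [hshift, splitOn_first t hl, List.drop_succ_cons]
        refine ⟨ht.1, ?_⟩
        rw [ht.2]
        have hftnn : 0 ≤ PySem.Chars.find t pvM := (PySem.Chars.find_nonneg_iff t pvM).mpr hmt
        have hfcs : PySem.Chars.find (l ++ '\n' :: t) pvM =
            (l.length : Int) + 1 + PySem.Chars.find t pvM := by
          rw [find_append_newline pvM_no_newline hml, if_neg (by omega)]
        have htn : (PySem.Chars.find (l ++ '\n' :: t) pvM).toNat =
            l.length + 1 + (PySem.Chars.find t pvM).toNat := by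
          rw [hfcs]; omega
        have htake : (l ++ '\n' :: t).take (l.length + 1 + (PySem.Chars.find t pvM).toNat) =
            l ++ '\n' :: t.take (PySem.Chars.find t pvM).toNat := by
          rw [List.take_append, List.take_of_length_le (by omega)]
          have : l.length + 1 + (PySem.Chars.find t pvM).toNat - l.length =
            (PySem.Chars.find t pvM).toNat + 1 := by omega
          rw [this, List.take_succ_cons]
        rw [htn, htake, rfind_append]
        have hrge := rfind_ge (t.take (PySem.Chars.find t pvM).toNat) ['\n']
        have hdropn : ((l.length : Int) + 1 + PySem.Chars.rfind
            (t.take (PySem.Chars.find t pvM).toNat) ['\n'] + 1).toNat =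
            l.length + 1 + (PySem.Chars.rfind (t.take (PySem.Chars.find t pvM).toNat) ['\n'] + 1).toNat := by
          omega
        have hdropm : ∀ j : Nat, (l ++ '\n' :: t).drop (l.length + 1 + j) = t.drop j := by
          intro j
          rw [List.drop_append, List.drop_of_length_le (le_of_eq rfl |>.trans (by omega))]
          have h2 : l.length + 1 + j - l.length = j + 1 := by omega
          rw [h2, List.drop_succ_cons]
          simp
        rw [hdropn, hdropm]

-- ===== VERDICT (by name: the statement is the Claim_ definition above) =====
theorem fix_molfile_spec : Claim_equal_fix_molfile := by
  intro mf_in _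
  unfold Spec_fix_molfile fix_molfile fix_molfile_alt
  simp only [PySem.Str.find, PySem.Str.rfindFrom]
  rw [show ("M  V30 BEGIN CTAB".toList) = pvM from rfl]
  rw [chars_splitOn_eq]
  by_cases hinf : pvM <:+: mf_in.toList
  · -- marker present
    have hnn : 0 ≤ PySem.Chars.find mf_in.toList pvM :=
      (PySem.Chars.find_nonneg_iff _ pvM).mpr hinf
    rw [if_neg (by omega)]
    rw [show ("\n".toList) = ['\n'] from rfl]
    rw [alt_lineStart mf_in.toList _ hnn (PySem.Chars.find_le_length _ pvM)]
    obtain ⟨hne, heq⟩ := main_eq mf_in.toList.length mf_in.toList rfl hinf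
    rw [join_hdr _ hne, heq]
    rw [PySem.Chars.slice_eq_listSlice,
      PySem.List.slice_from _ (by
        have := rfind_ge (mf_in.toList.take (PySem.Chars.find mf_in.toList pvM).toNat) ['\n']
        omega)]
  · -- no marker: both keep the whole string
    have hneg : PySem.Chars.find mf_in.toList pvM = -1 :=
      (PySem.Chars.find_eq_neg_one_iff _ pvM).mpr hinf
    rw [hneg, if_pos (by omega)]
    have hnm : ∀ u ∈ mf_in.toList.splitOn '\n', ¬ 0 ≤ PySem.Chars.find u pvM := by
      intro u hu hge
      exact hinf (((PySem.Chars.find_nonneg_iff u pvM).mp hge).trans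
        (line_infix mf_in.toList.length mf_in.toList u rfl hu))
    rw [fixFindStart_none _ hnm 0, List.drop_zero]
    rw [join_hdr _ (by unfold List.splitOn; exact List.splitOnP_ne_nil _ _)]
    rw [show PySem.Chars.join ['\n'] (mf_in.toList.splitOn '\n') = mf_in.toList from
      List.intercalate_splitOn _ '\n']
    rw [PySem.Chars.slice_eq_listSlice, PySem.List.slice_from _ (by omega)]
    simp
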